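-- pv_equiv track=rewrite | github.com/barszu/ASD | nauka1/zadania offline na wyslanie/zad3/backup/zad3.py | strong_string
-- ===== SOURCE A (Python) =====
-- def the_longest_str_in_tab(T):
--     longest=0
--     for i in range(len(T)):
--         dl=len(T[i])
--         if dl>longest: longest=dl
--     return longest
--
-- def create_data_tab(data,T):
--     for i in range(len(T)):
--         wyraz=T[i]
--         dl=len(wyraz)
--         data[dl].append(wyraz)
--
-- def obroc_wyrazy(T_str):
--     i=0
--     for s in T_str:
--         if s[0]>s[-1]:
--             T_str[i]=s[::-1]
--         i+=1
--
-- def compare_srt(tab_of_str,dl_str,n):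
--     # n=len(tab_of_str)
--     if (n<1) : return 0
--     tab_laczen=[1]*n #ile podobnych str jest z tym
--     maxy=0
--     tab_of_str.sort()
--     obroc_wyrazy(tab_of_str)
--     for i in range(n):
--         for j in range(i+1,n):
--             a=tab_of_str[i]
--             b=tab_of_str[j]
--             # c=b[::-1]
--             # if (a==b) or (a==c):
--             if (a==b):
--                 tab_laczen[i] += 1
--                 tab_laczen[j] += 1
--             # if is_equal(a,b,dl_str):
--             #     tab_laczen[i] += 1
--             #     tab_laczen[j] += 1
--                 if tab_laczen[i] > maxy : maxy=tab_laczen[i]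
--     # optynmalizacja ? max=my_maxi_na ifach(tab_laczen[i]) po +1
--     # return max(tab_laczen)
--     return maxy
--
-- def strong_string(T):
--     longest_str=the_longest_str_in_tab(T)
--     # longest_str=10
--     data=[ [] for _ in range(longest_str+1) ]
--     # i wiersz -> el o dl i
--     create_data_tab(data,T)
--     najnaj=0
--     i=0
--     for tab_str in data:
--         len_tab_str=len(tab_str)
--         if(len_tab_str<najnaj): continue
--         # if (i+1<najnaj): continue #nwm czm dziala? przypadek?
--
--         moc=compare_srt(tab_str , i , len_tab_str)
--         if moc>najnaj: najnaj=moc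
--         i += 1
--     a=1
--     return najnaj
-- ===== SOURCE B (Python) =====
-- def strong_string(T):
--     counts = {}
--     for s in T:
--         key = s[::-1] if s[0] > s[-1] else s
--         counts[key] = counts.get(key, 0) + 1
--     best = 0
--     for v in counts.values():
--         if v > best:
--             best = v
--     return best if best >= 2 else 0
-- ===== Notes on version B (the rewrite author's own statement) =====
-- stated objective: faster
-- what changed: Replaces A's length-bucketed table with a per-bucket sort and O(k^2) pairwise equality scan by a single flat pass that canonicalizes each string (reverse iff s[0] > s[-1]) and tallies canonical forms in a dict, returning the max tally if it is at least 2 else 0.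
import Mathlib
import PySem

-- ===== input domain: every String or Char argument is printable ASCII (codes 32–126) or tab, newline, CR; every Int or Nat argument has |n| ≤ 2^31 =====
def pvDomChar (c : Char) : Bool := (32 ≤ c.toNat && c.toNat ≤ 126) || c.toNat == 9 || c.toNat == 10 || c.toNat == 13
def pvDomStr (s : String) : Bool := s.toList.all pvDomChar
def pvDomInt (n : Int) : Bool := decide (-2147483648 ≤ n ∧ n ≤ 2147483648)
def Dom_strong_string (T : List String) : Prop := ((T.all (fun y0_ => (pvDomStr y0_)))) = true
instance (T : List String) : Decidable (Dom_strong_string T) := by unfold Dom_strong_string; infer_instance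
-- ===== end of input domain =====

-- B replaces A's length-bucketing + per-bucket sort + O(k^2) pairwise scan by one flat pass
-- tallying canonical forms (reverse iff s[0] > s[-1]) in a dict; return value only (A sorts its
-- local bucket lists in place, not the argument).

-- ===== PORT A =====
-- the_longest_str_in_tab: sequential loop over T keeping the running longest length
def pvTheLongestStrInTab (T : List String) : Int :=
  T.foldl (fun longest wyraz =>
    let dl : Int := wyraz.toList.length
    if dl > longest then dl else longest) 0

-- create_data_tab: data[len(wyraz)].append(wyraz); index always in range in A's use
def pvCreateDataTab (data : List (List String)) (T : List String) : List (List String) :=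
  T.foldl (fun data wyraz =>
    let dl := wyraz.toList.length
    data.set dl (data.getD dl [] ++ [wyraz])) data

-- body of obroc_wyrazy for one s: s[::-1] (exact: a full reverse) if s[0] > s[-1] else s;
-- on s = "" Python raises IndexError (pyGet? = none), excluded by Pre_
def pvCanonA (s : String) : String :=
  match PySem.Str.pyGet? s 0, PySem.Str.pyGet? s (-1) with
  | some c0, some c1 => if c0 > c1 then String.ofList s.toList.reverse else s
  | _, _ => s

-- obroc_wyrazy: writes T_str[i] while iterating; each write is at the index just read, so it is a map
def pvObrocWyrazy (T_str : List String) : List String := T_str.map pvCanonA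

-- inner j-loop body of compare_srt; i, j are always in range (pyGetD is exact here)
def pvInnerStep (tab2 : List String) (i : Int) (st : List Int × Int) (j : Int) : List Int × Int :=
  let a := PySem.List.pyGetD tab2 i ""
  let b := PySem.List.pyGetD tab2 j ""
  if a = b then
    let t1 := st.1.set i.toNat (PySem.List.pyGetD st.1 i 0 + 1)
    let t2 := t1.set j.toNat (PySem.List.pyGetD t1 j 0 + 1)
    let ti := PySem.List.pyGetD t2 i 0
    (t2, if ti > st.2 then ti else st.2)
  else st

def pvOuterRow (tab2 : List String) (n : Int) (st : List Int × Int) (i : Int) : List Int × Int :=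
  (PySem.List.pyRange (i + 1) n).foldl (pvInnerStep tab2 i) st

def pvCompareSrt (tab_of_str : List String) (_dl_str n : Int) : Int :=
  if n < 1 then 0
  else
    let tabLaczen : List Int := List.replicate n.toNat 1
    let sortedTab := PySem.List.sorted tab_of_str (fun x => x) false
    let tab2 := pvObrocWyrazy sortedTab
    ((PySem.List.pyRange 0 n).foldl (pvOuterRow tab2 n) (tabLaczen, 0)).2

-- body of the final loop of strong_string; state (najnaj, i); the continue skips the i increment
def pvStrongStep (st : Int × Int) (tab_str : List String) : Int × Int :=
  let len_tab_str : Int := tab_str.length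
  if len_tab_str < st.1 then st
  else
    let moc := pvCompareSrt tab_str st.2 len_tab_str
    ((if moc > st.1 then moc else st.1), st.2 + 1)

def strong_string (T : List String) : Int :=
  let longest := pvTheLongestStrInTab T
  let data : List (List String) := List.replicate (longest + 1).toNat []
  let data2 := pvCreateDataTab data T
  (data2.foldl pvStrongStep (0, 0)).1

-- ===== PORT B =====
-- key = s[::-1] if s[0] > s[-1] else s (same Python expression as in A's obroc_wyrazy)
def pvCanonB (s : String) : String :=
  match PySem.Str.pyGet? s 0, PySem.Str.pyGet? s (-1) with
  | some c0, some c1 => if c0 > c1 then String.ofList s.toList.reverse else s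
  | _, _ => s

def strong_string_alt (T : List String) : Int :=
  let counts := T.foldl (fun (d : PySem.Dict String Int) s =>
    let key := pvCanonB s
    d.insert key (d.getD key 0 + 1)) PySem.Dict.empty
  let best := counts.values.foldl (fun best v => if v > best then v else best) 0
  if best ≥ 2 then best else 0

-- ===== PRECONDITION & SPEC =====
-- A (and B) raise IndexError on s[0] for an empty string in T; Pre_ excludes exactly those inputs.
def Pre_strong_string (T : List String) : Prop := ∀ s ∈ T, s ≠ ""
instance (T : List String) : Decidable (Pre_strong_string T) := by unfold Pre_strong_string; infer_instance
def pvWitness_strong_string : List String := ["ab", "ba", "ab"]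
def Spec_strong_string (T : List String) (out : Int) : Prop := out = strong_string_alt T
instance (T : List String) (out : Int) : Decidable (Spec_strong_string T out) := by unfold Spec_strong_string; infer_instance

-- ===== CLAIM (what is proved, stated in full; the proofs are below) =====
def Claim_equal_strong_string : Prop := ∀ (T : List String), Dom_strong_string T → Pre_strong_string T → Spec_strong_string T (strong_string T)

-- ===== LEMMAS AND PROOFS =====

-- max multiplicity in K (0 for []), and the score both programs compute from it
def pvMmax (K : List String) : Int :=
  ((PySem.Set.ofList K).map (fun k => (K.count k : Int))).foldl max 0

def pvScore (K : List String) : Int := if 2 ≤ pvMmax K then pvMmax K else 0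

theorem pv_if_max (l : List Int) (b : Int) :
    l.foldl (fun m v => if v > m then v else m) b = l.foldl max b := by
  induction l generalizing b with
  | nil => rfl
  | cons x t ih => simp only [List.foldl]; rw [ih]; congr 1; omega

theorem pvMmax_nonneg (K : List String) : 0 ≤ pvMmax K := by
  unfold pvMmax; rw [List.foldl_map]
  exact (PySem.List.le_foldl_max_int _ (fun k => (K.count k : Int)) 0).1

theorem pv_count_le_mmax (K : List String) (x : String) (hx : x ∈ K) :
    (K.count x : Int) ≤ pvMmax K := by
  unfold pvMmax; rw [List.foldl_map]
  exact (PySem.List.le_foldl_max_int _ (fun k => (K.count k : Int)) 0).2 x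
    ((PySem.Set.mem_ofList K x).2 hx)

theorem pvMmax_mem (K : List String) :
    pvMmax K = 0 ∨ ∃ x ∈ K, pvMmax K = (K.count x : Int) := by
  rcases PySem.List.foldl_max_mem ((PySem.Set.ofList K).map (fun k => (K.count k : Int))) 0 with h | h
  · exact Or.inl h
  · rcases List.mem_map.1 h with ⟨x, hx, hfx⟩
    exact Or.inr ⟨x, (PySem.Set.mem_ofList K x).1 hx, hfx.symm⟩

theorem pvMmax_le (K K' : List String) (h : ∀ x, K.count x = K'.count x) :
    pvMmax K ≤ pvMmax K' := by
  rcases pvMmax_mem K with h0 | ⟨x, hx, hc⟩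
  · rw [h0]; exact pvMmax_nonneg K'
  · rw [hc, h x]
    exact pv_count_le_mmax K' x (List.count_pos_iff.1 (by rw [← h x]; exact List.count_pos_iff.2 hx))

-- B characterization: the counted dict is Counter(K) for K = T.map pvCanonB
theorem pvB_char (T : List String) : strong_string_alt T = pvScore (T.map pvCanonB) := by
  unfold strong_string_alt
  have h1 : (T.foldl (fun (d : PySem.Dict String Int) s =>
      d.insert (pvCanonB s) (d.getD (pvCanonB s) 0 + 1)) PySem.Dict.empty)
      = PySem.Dict.counter (T.map pvCanonB) := by
    rw [← PySem.Dict.foldl_insert_getD_add_one_eq_counter, List.foldl_map]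
  simp only [h1]
  rw [pv_if_max]
  have h2 : (PySem.Dict.counter (T.map pvCanonB)).values
      = (PySem.Set.ofList (T.map pvCanonB)).map (fun k => ((T.map pvCanonB).count k : Int)) := by
    show (PySem.Dict.counter (T.map pvCanonB)).items.map (·.2) = _
    rw [PySem.Dict.items_counter, List.map_map]
    rfl
  rw [h2]
  rfl

-- A-side machinery: loop states of compare_srt's double loop, and its characterization
def pvTRow (K : List String) (i : Nat) : List Int :=
  (List.range K.length).map (fun p =>
    if p < i then (K.count (K.getD p "") : Int) else 1 + ((K.take i).count (K.getD p "") : Int))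

def pvTMid (K : List String) (i jd : Nat) : List Int :=
  (List.range K.length).map (fun p =>
    if p < i then (K.count (K.getD p "") : Int)
    else if p = i then 1 + ((K.take i).count (K.getD i "") : Int)
      + (((K.drop (i+1)).take (jd - (i+1))).count (K.getD i "") : Int)
    else if p < jd then 1 + ((K.take (i+1)).count (K.getD p "") : Int)
    else 1 + ((K.take i).count (K.getD p "") : Int))

def pvRowContrib (K : List String) (i : Nat) (m : Int) : Int :=
  if (K.drop (i+1)).count (K.getD i "") = 0 then m
  else max m ((K.count (K.getD i "") : Int))

def pvRows (K : List String) (i : Nat) (m : Int) : Int :=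
  if _h : i < K.length then pvRows K (i+1) (pvRowContrib K i m) else m
termination_by K.length - i

theorem pv_count_take_drop (l : List String) (k : Nat) (x : String) :
    l.count x = (l.take k).count x + (l.drop k).count x := by
  conv_lhs => rw [← List.take_append_drop k l]
  rw [List.count_append]

theorem pv_drop_succ_count (K : List String) (i : Nat) (x : String) (h : i < K.length) :
    (K.drop i).count x = (if K.getD i "" = x then 1 else 0) + (K.drop (i+1)).count x := by
  rw [List.drop_eq_getElem_cons h, List.count_cons, List.getD_eq_getElem _ _ h]
  simp only [beq_iff_eq]
  rcases eq_or_ne x K[i] with hx | hx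
  · simp [hx]; omega
  · simp [hx.symm]

theorem pv_take_succ_count (K : List String) (i : Nat) (x : String) (h : i < K.length) :
    (K.take (i+1)).count x = (K.take i).count x + (if K.getD i "" = x then 1 else 0) := by
  rw [List.take_add_one, List.getElem?_eq_getElem h]
  simp only [Option.toList_some, List.count_append, List.count_cons, List.count_nil,
    List.getD_eq_getElem _ _ h, beq_iff_eq]
  by_cases hx : x = K[i] <;> simp [hx]

theorem pv_getD_drop (K : List String) (m k : Nat) (h : m + k < K.length) :
    (K.drop m).getD k "" = K.getD (m + k) "" := by
  rw [List.getD_eq_getElem _ _ (by simp; omega), List.getD_eq_getElem _ _ h, List.getElem_drop]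

theorem pv_tmid_start (K : List String) (i : Nat) :
    pvTMid K i (i+1) = pvTRow K i := by
  unfold pvTMid pvTRow
  apply List.map_congr_left
  intro p hp
  rw [List.mem_range] at hp
  rcases lt_trichotomy p i with h | h | h
  · simp [h]
  · subst h
    simp
  · have h1 : ¬ p < i := by omega
    have h2 : p ≠ i := by omega
    have h3 : ¬ p < i + 1 := by omega
    simp [h1, h2, h3]

theorem pv_tmid_top (K : List String) (i : Nat) (hi : i < K.length) :
    pvTMid K i K.length = pvTRow K (i+1) := by
  unfold pvTMid pvTRow
  apply List.map_congr_left
  intro p hp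
  rw [List.mem_range] at hp
  rcases lt_trichotomy p i with h | h | h
  · simp [h, show p < i + 1 by omega]
  · subst h
    simp only [Nat.lt_irrefl, if_false, if_true, if_pos (Nat.lt_succ_self p)]
    have h2 : (K.drop (p+1)).take (K.length - (p+1)) = K.drop (p+1) := by
      apply List.take_of_length_le; simp
    rw [h2]
    have h3 := pv_count_take_drop K p (K.getD p "")
    have h4 := pv_drop_succ_count K p (K.getD p "") hi
    rw [if_pos rfl] at h4
    omega
  · have h1 : ¬ p < i := by omega
    have h2 : p ≠ i := by omega
    have h4 : ¬ p < i + 1 := by omega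
    simp [h1, h2, hp, h4]

theorem pv_if_max' (a m : Int) : (if a > m then a else m) = max m a := by omega

theorem pv_inner (K : List String) (i : Nat) (hi : i < K.length) :
    ∀ (fuel jd : Nat), K.length - jd ≤ fuel → i < jd → jd ≤ K.length → ∀ m,
    (PySem.List.pyRange (jd : Int) (K.length : Int)).foldl (pvInnerStep K (i : Int)) (pvTMid K i jd, m)
    = (pvTRow K (i+1),
       if (K.drop jd).count (K.getD i "") = 0 then m
       else max m ((K.count (K.getD i "") : Int))) := by
  intro fuel
  induction fuel with
  | zero =>
    intro jd hf hij hjn m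
    have hjd : jd = K.length := by omega
    subst hjd
    rw [PySem.List.pyRange_one_eq_nil (le_refl _), List.foldl_nil, pv_tmid_top K i hi]
    simp
  | succ fuel ih =>
    intro jd hf hij hjn m
    rcases Nat.eq_or_lt_of_le hjn with hjd | hjd
    · subst hjd
      rw [PySem.List.pyRange_one_eq_nil (le_refl _), List.foldl_nil, pv_tmid_top K i hi]
      simp
    · have hcast : (jd : Int) < (K.length : Int) := by exact_mod_cast hjd
      rw [PySem.List.pyRange_one_cons hcast, List.foldl_cons]
      have hjd1 : ((jd : Int) + 1) = ((jd + 1 : Nat) : Int) := by push_cast; ring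
      by_cases hxy : K.getD i "" = K.getD jd ""
      · -- equal strings: both counters bump, maxy updated
        have hlen_t : (pvTMid K i jd).length = K.length := by unfold pvTMid; simp
        have hij' : i ≠ jd := by omega
        have hAi : (pvTMid K i jd).getD i 0
            = 1 + ((K.take i).count (K.getD i "") : Int)
              + (((K.drop (i+1)).take (jd-(i+1))).count (K.getD i "") : Int) := by
          unfold pvTMid
          rw [PySem.List.getD_map_range _ _ _ _ hi]
          simp
        have hstep : pvInnerStep K (i : Int) (pvTMid K i jd, m) (jd : Int)
            = (pvTMid K i (jd+1),
               max m (1 + ((K.take i).count (K.getD i "") : Int)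
                 + (((K.drop (i+1)).take (jd-(i+1))).count (K.getD i "") : Int) + 1)) := by
          unfold pvInnerStep
          simp only [PySem.List.pyGetD_natCast, Int.toNat_natCast]
          rw [if_pos hxy, hAi]
          have hB : ((pvTMid K i jd).set i (1 + ((K.take i).count (K.getD i "") : Int)
              + (((K.drop (i+1)).take (jd-(i+1))).count (K.getD i "") : Int) + 1)).getD jd 0
              = 1 + ((K.take i).count (K.getD jd "") : Int) := by
            rw [List.getD_eq_getElem _ _ (by rw [List.length_set, hlen_t]; exact hjd)]
            rw [List.getElem_set, if_neg hij']
            unfold pvTMid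
            rw [List.getElem_map, List.getElem_range]
            simp [show ¬ jd < i by omega, Ne.symm hij']
          rw [hB]
          have ht2 : (((pvTMid K i jd).set i (1 + ((K.take i).count (K.getD i "") : Int)
                + (((K.drop (i+1)).take (jd-(i+1))).count (K.getD i "") : Int) + 1)).set jd
                  (1 + ((K.take i).count (K.getD jd "") : Int) + 1))
              = pvTMid K i (jd+1) := by
            apply List.ext_getElem
            · rw [List.length_set, List.length_set, hlen_t]
              unfold pvTMid
              simp
            · intro p h1 h2
              have hpK : p < K.length := by
                rw [List.length_set, List.length_set, hlen_t] at h1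
                exact h1
              rw [List.getElem_set, List.getElem_set]
              by_cases hpjd : p = jd
              · subst hpjd
                rw [if_pos rfl]
                unfold pvTMid
                rw [List.getElem_map, List.getElem_range]
                rw [if_neg (show ¬ p < i by omega), if_neg (Ne.symm hij'),
                  if_pos (Nat.lt_succ_self p)]
                rw [pv_take_succ_count K i (K.getD p "") hi, if_pos hxy]
                push_cast
                ring
              · by_cases hpi : p = i
                · subst hpi
                  rw [if_neg (fun hc => hpjd hc.symm), if_pos rfl]
                  unfold pvTMid
                  rw [List.getElem_map, List.getElem_range]
                  rw [if_neg (Nat.lt_irrefl p), if_pos rfl]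
                  have h5 : jd + 1 - (p+1) = (jd - (p+1)) + 1 := by omega
                  rw [h5, pv_take_succ_count (K.drop (p+1)) (jd - (p+1)) (K.getD p "")
                    (by simp; omega)]
                  rw [pv_getD_drop K (p+1) (jd - (p+1)) (by omega),
                    show p+1+(jd-(p+1)) = jd by omega, if_pos hxy.symm]
                  push_cast
                  ring
                · rw [if_neg (fun hc => hpjd hc.symm), if_neg (fun hc => hpi hc.symm)]
                  unfold pvTMid
                  rw [List.getElem_map, List.getElem_range, List.getElem_map, List.getElem_range]
                  by_cases hlti : p < i
                  · simp [hlti]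
                  · by_cases hltj : p < jd
                    · simp [hlti, hpi, hltj, show p < jd + 1 by omega]
                    · simp [hlti, hpi, hltj, show ¬ p < jd + 1 by omega]
          rw [ht2]
          have hti : ((pvTMid K i (jd+1))).getD i 0
              = 1 + ((K.take i).count (K.getD i "") : Int)
                + (((K.drop (i+1)).take (jd-(i+1))).count (K.getD i "") : Int) + 1 := by
            unfold pvTMid
            rw [PySem.List.getD_map_range _ _ _ _ hi]
            simp only [Nat.lt_irrefl, if_false, if_true]
            have h5 : jd + 1 - (i+1) = (jd - (i+1)) + 1 := by omega
            rw [h5, pv_take_succ_count (K.drop (i+1)) (jd - (i+1)) (K.getD i "")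
              (by simp; omega)]
            rw [pv_getD_drop K (i+1) (jd - (i+1)) (by omega),
              show i+1+(jd-(i+1)) = jd by omega, if_pos hxy.symm]
            push_cast
            ring
          rw [hti, pv_if_max']
        rw [hstep, hjd1, ih (jd+1) (by omega) (by omega) (by omega) _]
        have hsplit : (K.drop (i+1)).count (K.getD i "")
            = ((K.drop (i+1)).take (jd-(i+1))).count (K.getD i "")
              + (K.drop jd).count (K.getD i "") := by
          rw [pv_count_take_drop (K.drop (i+1)) (jd-(i+1)) (K.getD i ""), List.drop_drop,
            show i+1+(jd-(i+1)) = jd by omega]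
        have hcnt : K.count (K.getD i "") = (K.take i).count (K.getD i "") + 1
            + (K.drop (i+1)).count (K.getD i "") := by
          have h6 := pv_count_take_drop K i (K.getD i "")
          have h7 := pv_drop_succ_count K i (K.getD i "") hi
          rw [if_pos rfl] at h7
          omega
        have hdj : (K.drop jd).count (K.getD i "") = 1 + (K.drop (jd+1)).count (K.getD i "") := by
          rw [pv_drop_succ_count K jd (K.getD i "") hjd, if_pos hxy.symm]
        simp only [Prod.mk.injEq]
        refine ⟨trivial, ?_⟩
        split_ifs with hz1 hz2 <;> omega
      · -- different strings: state unchanged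
        have hstep : pvInnerStep K (i : Int) (pvTMid K i jd, m) (jd : Int) = (pvTMid K i jd, m) := by
          unfold pvInnerStep
          simp only [PySem.List.pyGetD_natCast]
          rw [if_neg hxy]
        rw [hstep]
        have hmid : pvTMid K i jd = pvTMid K i (jd + 1) := by
          unfold pvTMid
          apply List.map_congr_left
          intro p hp
          rw [List.mem_range] at hp
          rcases lt_trichotomy p i with h | h | h
          · simp [h]
          · subst h
            have h1 : ¬ p < p := Nat.lt_irrefl p
            simp only [h1, if_false, if_true]
            have h5 : jd + 1 - (p+1) = (jd - (p+1)) + 1 := by omega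
            rw [h5, pv_take_succ_count (K.drop (p+1)) (jd - (p+1)) (K.getD p "") (by simp; omega)]
            rw [pv_getD_drop K (p+1) (jd - (p+1)) (by omega), show p+1+(jd-(p+1)) = jd by omega]
            rw [if_neg (fun hc => hxy hc.symm)]
            omega
          · have h1 : ¬ p < i := by omega
            have h2 : p ≠ i := by omega
            by_cases h3 : p < jd
            · simp [h1, h2, h3, show p < jd + 1 by omega]
            · by_cases h4 : p < jd + 1
              · -- p = jd
                have hpjd : p = jd := by omega
                subst hpjd
                simp only [h1, if_false, h2, if_false, h3, if_false, h4, if_true]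
                rw [pv_take_succ_count K i (K.getD p "") hi, if_neg hxy]
                rfl
              · simp [h1, h2, h3, h4]
        rw [hmid, hjd1, ih (jd+1) (by omega) (by omega) (by omega) m]
        have hcnt : (K.drop jd).count (K.getD i "") = (K.drop (jd+1)).count (K.getD i "") := by
          rw [pv_drop_succ_count K jd (K.getD i "") hjd, if_neg (fun hc => hxy hc.symm)]
          omega
        rw [hcnt]

theorem pv_trow_ge (K : List String) (i : Nat) (h : K.length ≤ i) :
    pvTRow K i = pvTRow K K.length := by
  unfold pvTRow
  apply List.map_congr_left
  intro p hp
  rw [List.mem_range] at hp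
  simp [show p < i by omega, hp]

theorem pv_outer (K : List String) :
    ∀ (fuel id : Nat) (m : Int), K.length - id ≤ fuel →
    (PySem.List.pyRange (id : Int) (K.length : Int)).foldl (pvOuterRow K (K.length : Int)) (pvTRow K id, m)
    = (pvTRow K K.length, pvRows K id m) := by
  intro fuel
  induction fuel with
  | zero =>
    intro id m hf
    have hid : K.length ≤ id := by omega
    rw [PySem.List.pyRange_one_eq_nil (by exact_mod_cast hid), List.foldl_nil,
      pv_trow_ge K id hid, pvRows, dif_neg (by omega)]
  | succ fuel ih =>
    intro id m hf
    rcases Nat.lt_or_ge id K.length with hid | hid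
    · rw [PySem.List.pyRange_one_cons (by exact_mod_cast hid), List.foldl_cons]
      have h1 : pvOuterRow K (K.length : Int) (pvTRow K id, m) (id : Int)
          = (pvTRow K (id+1), pvRowContrib K id m) := by
        unfold pvOuterRow
        rw [← pv_tmid_start K id, show ((id : Int) + 1) = ((id + 1 : Nat) : Int) by push_cast; ring]
        exact pv_inner K id hid K.length (id+1) (by omega) (by omega) (by omega) m
      rw [h1, show ((id : Int) + 1) = ((id + 1 : Nat) : Int) by push_cast; ring,
        ih (id+1) (pvRowContrib K id m) (by omega)]
      conv_rhs => rw [pvRows]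
      rw [dif_pos hid]
    · rw [PySem.List.pyRange_one_eq_nil (by exact_mod_cast hid), List.foldl_nil,
        pv_trow_ge K id hid, pvRows, dif_neg (by omega)]

theorem pv_rows_ge (K : List String) :
    ∀ (fuel i : Nat) (m : Int), K.length - i ≤ fuel → m ≤ pvRows K i m := by
  intro fuel
  induction fuel with
  | zero =>
    intro i m hf
    rw [pvRows, dif_neg (by omega)]
  | succ fuel ih =>
    intro i m hf
    rcases Nat.lt_or_ge i K.length with hid | hid
    · rw [pvRows, dif_pos hid]
      refine le_trans ?_ (ih (i+1) _ (by omega))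
      unfold pvRowContrib
      split_ifs <;> omega
    · rw [pvRows, dif_neg (by omega)]

theorem pv_rows_le (K : List String) (C : Int)
    (hC : ∀ p, p < K.length → (K.drop (p+1)).count (K.getD p "") ≠ 0 →
      (K.count (K.getD p "") : Int) ≤ C) :
    ∀ (fuel i : Nat) (m : Int), K.length - i ≤ fuel → m ≤ C → pvRows K i m ≤ C := by
  intro fuel
  induction fuel with
  | zero =>
    intro i m hf hm
    rw [pvRows, dif_neg (by omega)]
    exact hm
  | succ fuel ih =>
    intro i m hf hm
    rcases Nat.lt_or_ge i K.length with hid | hid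
    · rw [pvRows, dif_pos hid]
      refine ih (i+1) _ (by omega) ?_
      unfold pvRowContrib
      split_ifs with h
      · exact hm
      · have := hC i hid h
        omega
    · rw [pvRows, dif_neg (by omega)]
      exact hm

theorem pv_rows_reach (K : List String) (p : Nat) (hp : p < K.length)
    (hdup : (K.drop (p+1)).count (K.getD p "") ≠ 0) :
    ∀ (fuel i : Nat) (m : Int), K.length - i ≤ fuel → i ≤ p →
    (K.count (K.getD p "") : Int) ≤ pvRows K i m := by
  intro fuel
  induction fuel with
  | zero =>
    intro i m hf hip
    omega
  | succ fuel ih =>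
    intro i m hf hip
    rcases Nat.eq_or_lt_of_le hip with hie | hie
    · subst hie
      rw [pvRows, dif_pos hp]
      refine le_trans ?_ (pv_rows_ge K (fuel+1) (i+1) _ (by omega))
      unfold pvRowContrib
      rw [if_neg hdup]
      omega
    · rw [pvRows, dif_pos (by omega)]
      exact ih (i+1) _ (by omega) (by omega)

theorem pv_rows_eq_score (K : List String) : pvRows K 0 0 = pvScore K := by
  unfold pvScore
  have hgetD_mem : ∀ p, p < K.length → K.getD p "" ∈ K := by
    intro p hp
    rw [List.getD_eq_getElem _ _ hp]
    exact List.getElem_mem hp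
  by_cases hm : 2 ≤ pvMmax K
  · rw [if_pos hm]
    rcases pvMmax_mem K with h0 | ⟨x0, hx0, hc0⟩
    · omega
    · have hcnt2 : 2 ≤ K.count x0 := by omega
      have hp0 : K.idxOf x0 < K.length := List.idxOf_lt_length_of_mem hx0
      have hKp0 : K.getD (K.idxOf x0) "" = x0 := by
        rw [List.getD_eq_getElem _ _ hp0]
        exact List.getElem_idxOf hp0
      have htake0 : (K.take (K.idxOf x0)).count x0 = 0 := by
        rw [List.count_eq_zero]
        intro hmem
        have := (List.mem_take_iff_idxOf_lt hx0).1 hmem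
        omega
      have hdrop : (K.drop (K.idxOf x0 + 1)).count x0 ≠ 0 := by
        have h6 := pv_count_take_drop K (K.idxOf x0) x0
        have h7 := pv_drop_succ_count K (K.idxOf x0) x0 hp0
        rw [if_pos hKp0] at h7
        omega
      apply le_antisymm
      · refine pv_rows_le K (pvMmax K) ?_ (K.length + 1) 0 0 (by omega) (pvMmax_nonneg K)
        intro p hp _
        exact pv_count_le_mmax K _ (hgetD_mem p hp)
      · rw [hc0]
        have := pv_rows_reach K (K.idxOf x0) hp0 (by rw [hKp0]; exact hdrop)
          (K.length + 1) 0 0 (by omega) (by omega)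
        rw [hKp0] at this
        exact this
  · rw [if_neg hm]
    apply le_antisymm
    · refine pv_rows_le K 0 ?_ (K.length + 1) 0 0 (by omega) (le_refl 0)
      intro p hp hdup
      have h6 := pv_count_take_drop K p (K.getD p "")
      have h7 := pv_drop_succ_count K p (K.getD p "") hp
      rw [if_pos rfl] at h7
      have h8 := pv_count_le_mmax K _ (hgetD_mem p hp)
      omega
    · exact pv_rows_ge K (K.length + 1) 0 0 (by omega)

theorem pvScore_congr (K K' : List String) (h : ∀ x, K.count x = K'.count x) :
    pvScore K = pvScore K' := by
  have he : pvMmax K = pvMmax K' :=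
    le_antisymm (pvMmax_le K K' h) (pvMmax_le K' K (fun x => (h x).symm))
  unfold pvScore
  rw [he]

theorem pv_replicate_trow (K : List String) : List.replicate K.length (1 : Int) = pvTRow K 0 := by
  unfold pvTRow
  apply List.ext_getElem
  · simp
  · intro p h1 h2
    rw [List.getElem_replicate, List.getElem_map, List.getElem_range]
    simp

theorem pvCmp_char (l : List String) (d : Int) :
    pvCompareSrt l d (l.length : Int) = pvScore (l.map pvCanonA) := by
  unfold pvCompareSrt
  rcases List.eq_nil_or_concat' l with hl | ⟨l', x, hl⟩
  · subst hl
    simp [pvScore, pvMmax, PySem.Set.ofList]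
  · have hlen : l ≠ [] := by subst hl; simp
    have hn : ¬ ((l.length : Int) < 1) := by
      have : 0 < l.length := List.length_pos_iff.2 hlen
      omega
    rw [if_neg hn]
    show ((PySem.List.pyRange 0 (l.length : Int)).foldl
        (pvOuterRow (pvObrocWyrazy (PySem.List.sorted l (fun x => x) false)) (l.length : Int))
        (List.replicate ((l.length : Int)).toNat 1, 0)).2 = _
    have hKlen : (pvObrocWyrazy (PySem.List.sorted l (fun x => x) false)).length = l.length := by
      unfold pvObrocWyrazy
      rw [List.length_map, PySem.List.length_sorted]
    rw [Int.toNat_natCast l.length, ← hKlen, pv_replicate_trow,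
      show ((0 : Int)) = ((0 : Nat) : Int) by norm_num,
      pv_outer _ ((pvObrocWyrazy (PySem.List.sorted l (fun x => x) false)).length + 1) 0 (((0 : Nat) : Int)) (by omega)]
    show pvRows _ 0 0 = _
    rw [pv_rows_eq_score]
    apply pvScore_congr
    intro x
    unfold pvObrocWyrazy
    exact List.Perm.count_eq (List.Perm.map pvCanonA (PySem.List.sorted_perm l (fun x => x) false)) x

theorem pv_longest_spec (T : List String) :
    0 ≤ pvTheLongestStrInTab T ∧ ∀ s ∈ T, (s.toList.length : Int) ≤ pvTheLongestStrInTab T := by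
  unfold pvTheLongestStrInTab
  have h : (fun (longest : Int) (wyraz : String) =>
      let dl : Int := wyraz.toList.length
      if dl > longest then dl else longest)
      = (fun acc y => max acc ((y.toList.length : Int))) := by
    funext a b
    show (if (b.toList.length : Int) > a then (b.toList.length : Int) else a) = _
    omega
  rw [h]
  exact PySem.List.le_foldl_max_int T (fun y => (y.toList.length : Int)) 0

theorem pvScore_nonneg (K : List String) : 0 ≤ pvScore K := by
  unfold pvScore
  have := pvMmax_nonneg K
  split_ifs <;> omega

theorem pvScore_le_length (K : List String) : pvScore K ≤ (K.length : Int) := by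
  unfold pvScore
  rcases pvMmax_mem K with h0 | ⟨x, hx, hc⟩ <;> split_ifs with h2
  · omega
  · exact Int.natCast_nonneg K.length
  · rw [hc]
    exact_mod_cast List.count_le_length
  · exact Int.natCast_nonneg K.length

theorem pv_strong_fold (bs : List (List String)) :
    ∀ (najnaj i : Int), 0 ≤ najnaj →
    (bs.foldl pvStrongStep (najnaj, i)).1
      = bs.foldl (fun m b => max m (pvScore (b.map pvCanonA))) najnaj := by
  induction bs with
  | nil => intro najnaj i h0; rfl
  | cons b t ih =>
    intro najnaj i h0
    rw [List.foldl_cons, List.foldl_cons]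
    by_cases hskip : (b.length : Int) < najnaj
    · have hs : pvStrongStep (najnaj, i) b = (najnaj, i) := by
        unfold pvStrongStep
        rw [if_pos hskip]
      rw [hs, ih najnaj i h0]
      have h1 := pvScore_le_length (b.map pvCanonA)
      rw [List.length_map] at h1
      congr 1
      omega
    · have hs : pvStrongStep (najnaj, i) b = (max najnaj (pvScore (b.map pvCanonA)), i + 1) := by
        unfold pvStrongStep
        rw [if_neg hskip]
        show ((if pvCompareSrt b i (b.length : Int) > najnaj
          then pvCompareSrt b i (b.length : Int) else najnaj), i + 1) = _
        rw [pvCmp_char b i, pv_if_max']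
      rw [hs]
      exact ih _ _ (le_trans h0 (le_max_left _ _))

theorem pv_foldl_max_le (l : List Nat) (g : Nat → Int) (C : Int) :
    ∀ b : Int, b ≤ C → (∀ d ∈ l, g d ≤ C) →
    l.foldl (fun m d => max m (g d)) b ≤ C := by
  induction l with
  | nil => intro b hb _; exact hb
  | cons x t ih =>
    intro b hb hg
    rw [List.foldl_cons]
    refine ih _ (max_le hb (hg x (List.mem_cons_self))) ?_
    intro d hd
    exact hg d (List.mem_cons_of_mem _ hd)

theorem pvScore_filter_le (K : List String) (p : String → Bool) :
    pvScore (K.filter p) ≤ pvScore K := by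
  by_cases h2 : 2 ≤ pvMmax (K.filter p)
  · rcases pvMmax_mem (K.filter p) with h0 | ⟨x, hx, hc⟩
    · omega
    · have hxK : x ∈ K := (List.mem_filter.1 hx).1
      have hfle : (K.filter p).count x ≤ K.count x := by
        have hsub : (K.filter p).Sublist K := List.filter_sublist
        exact hsub.count_le x
      have h3 : (K.count x : Int) ≤ pvMmax K := pv_count_le_mmax K x hxK
      have hK2 : 2 ≤ pvMmax K := by omega
      unfold pvScore
      rw [if_pos h2, if_pos hK2]
      omega
  · have := pvScore_nonneg K
    unfold pvScore
    rw [if_neg h2]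
    split_ifs with h <;> [exact le_trans (by omega) (le_refl _); omega]

theorem pv_combine (K : List String) (L1 : Nat)
    (hb : ∀ x ∈ K, x.toList.length < L1) :
    (List.range L1).foldl (fun m d => max m (pvScore (K.filter (fun x => x.toList.length == d)))) 0
      = pvScore K := by
  apply le_antisymm
  · exact pv_foldl_max_le (List.range L1) _ (pvScore K) 0 (pvScore_nonneg K)
      (fun d _ => pvScore_filter_le K _)
  · by_cases h2 : 2 ≤ pvMmax K
    · rcases pvMmax_mem K with h0 | ⟨x0, hx0, hc0⟩
      · omega
      · have hd0 : x0.toList.length ∈ List.range L1 := List.mem_range.2 (hb x0 hx0)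
        have hfold := (PySem.List.le_foldl_max_int (List.range L1)
          (fun d => pvScore (K.filter (fun x => x.toList.length == d))) 0).2 _ hd0
        refine le_trans ?_ hfold
        have hxf : x0 ∈ K.filter (fun x => x.toList.length == x0.toList.length) :=
          List.mem_filter.2 ⟨hx0, by simp⟩
        have hcf : (K.filter (fun x => x.toList.length == x0.toList.length)).count x0
            = K.count x0 := List.count_filter (by simp)
        have h4 : (K.count x0 : Int) ≤ pvMmax (K.filter (fun x => x.toList.length == x0.toList.length)) := by
          rw [← hcf]
          exact pv_count_le_mmax _ _ hxf
        have h5 : 2 ≤ pvMmax (K.filter (fun x => x.toList.length == x0.toList.length)) := by omega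
        unfold pvScore
        rw [if_pos h2, if_pos h5]
        omega
    · have h0 := (PySem.List.le_foldl_max_int (List.range L1)
        (fun d => pvScore (K.filter (fun x => x.toList.length == d))) 0).1
      unfold pvScore
      rw [if_neg h2]
      exact h0

theorem pv_canon_len (s : String) : (pvCanonA s).toList.length = s.toList.length := by
  unfold pvCanonA
  rcases h0 : PySem.Str.pyGet? s 0 with _ | c0 <;> rcases h1 : PySem.Str.pyGet? s (-1) with _ | c1 <;>
    simp only []
  split_ifs <;> simp

theorem pv_cdt (T : List String) :
    ∀ (init : List (List String)), (∀ s ∈ T, s.toList.length < init.length) →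
    (pvCreateDataTab init T).length = init.length ∧
    ∀ d, d < init.length →
      (pvCreateDataTab init T).getD d [] = init.getD d [] ++ T.filter (fun s => s.toList.length == d) := by
  induction T with
  | nil =>
    intro init _
    refine ⟨rfl, ?_⟩
    intro d _
    simp [pvCreateDataTab]
  | cons w t ih =>
    intro init hbound
    have hw : w.toList.length < init.length := hbound w (List.mem_cons_self)
    have hstep : pvCreateDataTab init (w :: t)
        = pvCreateDataTab (init.set w.toList.length (init.getD w.toList.length [] ++ [w])) t := by
      unfold pvCreateDataTab
      rw [List.foldl_cons]
    have hlen : (init.set w.toList.length (init.getD w.toList.length [] ++ [w])).length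
        = init.length := List.length_set ..
    have hb2 : ∀ s ∈ t, s.toList.length
        < (init.set w.toList.length (init.getD w.toList.length [] ++ [w])).length := by
      intro s hs
      rw [hlen]
      exact hbound s (List.mem_cons_of_mem _ hs)
    obtain ⟨ihlen, ihgetD⟩ := ih _ hb2
    rw [hstep]
    refine ⟨by rw [ihlen, hlen], ?_⟩
    intro d hd
    rw [ihgetD d (by rw [hlen]; exact hd)]
    have hset : (init.set w.toList.length (init.getD w.toList.length [] ++ [w])).getD d []
        = if w.toList.length = d then init.getD d [] ++ [w] else init.getD d [] := by
      rw [List.getD_eq_getElem _ _ (by rw [hlen]; exact hd), List.getElem_set,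
        List.getD_eq_getElem _ _ hd]
      split_ifs with hdd
      · subst hdd; rw [List.getD_eq_getElem _ _ hw]
      · rfl
    rw [hset, List.filter_cons]
    by_cases hdd : w.toList.length = d
    · rw [if_pos hdd, if_pos (show (w.toList.length == d) = true from beq_iff_eq.mpr hdd)]
      simp
    · rw [if_neg hdd, if_neg (show ¬ ((w.toList.length == d) = true) from by
        rw [beq_iff_eq]; exact hdd)]

theorem pvA_char (T : List String) : strong_string T = pvScore (T.map pvCanonA) := by
  unfold strong_string
  show (List.foldl pvStrongStep (0, 0)
    (pvCreateDataTab (List.replicate (pvTheLongestStrInTab T + 1).toNat []) T)).1 = _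
  obtain ⟨hL0, hLb⟩ := pv_longest_spec T
  have hcast : (((pvTheLongestStrInTab T + 1).toNat : Nat) : Int) = pvTheLongestStrInTab T + 1 :=
    Int.toNat_of_nonneg (by omega)
  have hlenrep : (List.replicate (pvTheLongestStrInTab T + 1).toNat ([] : List String)).length
      = (pvTheLongestStrInTab T + 1).toNat := List.length_replicate ..
  have hbound : ∀ s ∈ T, s.toList.length
      < (List.replicate (pvTheLongestStrInTab T + 1).toNat ([] : List String)).length := by
    intro s hs
    rw [hlenrep]
    have := hLb s hs
    omega
  obtain ⟨hdlen, hdgetD⟩ := pv_cdt T _ hbound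
  have hdata : pvCreateDataTab (List.replicate (pvTheLongestStrInTab T + 1).toNat []) T
      = (List.range (pvTheLongestStrInTab T + 1).toNat).map
          (fun d => T.filter (fun s => s.toList.length == d)) := by
    apply List.ext_getElem
    · rw [hdlen, hlenrep]
      simp
    · intro p h1 h2
      have hp : p < (pvTheLongestStrInTab T + 1).toNat := by
        rw [hdlen, hlenrep] at h1
        exact h1
      rw [List.getElem_map, List.getElem_range]
      rw [← List.getD_eq_getElem _ ([] : List String) h1,
        hdgetD p (by rw [hlenrep]; exact hp)]
      rw [List.getD_eq_getElem _ _ (by rw [hlenrep]; exact hp), List.getElem_replicate]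
      rfl
  rw [hdata, pv_strong_fold _ 0 0 (le_refl 0), List.foldl_map]
  have hfilt : ∀ d : Nat, (T.filter (fun s => s.toList.length == d)).map pvCanonA
      = (T.map pvCanonA).filter (fun x => x.toList.length == d) := by
    intro d
    rw [List.filter_map]
    congr 1
    apply List.filter_congr
    intro s _
    show (s.toList.length == d) = ((pvCanonA s).toList.length == d)
    rw [pv_canon_len]
  have hfun : (fun (m : Int) (d : Nat) =>
      max m (pvScore ((T.filter (fun s => s.toList.length == d)).map pvCanonA)))
      = (fun (m : Int) (d : Nat) =>
      max m (pvScore ((T.map pvCanonA).filter (fun x => x.toList.length == d)))) := by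
    funext m d
    rw [hfilt d]
  rw [hfun]
  apply pv_combine
  intro x hx
  rcases List.mem_map.1 hx with ⟨s, hs, hxs⟩
  rw [← hxs, pv_canon_len]
  have := hLb s hs
  omega

-- ===== VERDICT (by name: the statement is the Claim_ definition above) =====
theorem strong_string_spec : Claim_equal_strong_string := by
  intro T _ _
  unfold Spec_strong_string
  rw [pvA_char, pvB_char]
  rfl
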